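-- pv_equiv track=rewrite | github.com/rav-maker/Data-Structures-and-Algorithms | Array/Count_Triplets.py | CountTriplet
-- ===== SOURCE A (Python) =====
-- from collections import defaultdict
--
-- def CountTriplet(arr,n):
--     count = 0
--     d = defaultdict(lambda:0)
--
--     for a in arr:
--         d[a]+=1
--
--     for i in range(n):
--         j = i+1
--         while j<n:
--             if d[arr[i]+arr[j]]:
--                 count+=1
--             j+=1
--
--     return count
-- ===== SOURCE B (Python) =====
-- from collections import Counter
--
-- def CountTriplet(arr, n):
--     # Count pairs i<j (i,j < n) with arr[i]+arr[j] present in arr,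
--     # via value frequencies: ordered pairs over distinct values, minus self-pairs, halved.
--     if n < 2:
--         return 0
--     present = set(arr)
--     pre = arr[:n]
--     cnt = Counter(pre)
--     ordered = 0
--     for x, cx in cnt.items():
--         for y, cy in cnt.items():
--             if x + y in present:
--                 ordered += cx * cy
--     diag = 0
--     for v in pre:
--         if 2 * v in present:
--             diag += 1
--     return (ordered - diag) // 2
-- ===== Notes on version B (the rewrite author's own statement) =====
-- stated objective: alternative
-- what changed: B replaces A's scan over all index pairs with frequency counting: it builds a Counter of the n-prefix once, sums cx*cy over ordered pairs of distinct values whose sum is present, subtracts the self-pair diagonal and halves, so the double loop runs over distinct values instead of index pairs.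
import Mathlib
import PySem

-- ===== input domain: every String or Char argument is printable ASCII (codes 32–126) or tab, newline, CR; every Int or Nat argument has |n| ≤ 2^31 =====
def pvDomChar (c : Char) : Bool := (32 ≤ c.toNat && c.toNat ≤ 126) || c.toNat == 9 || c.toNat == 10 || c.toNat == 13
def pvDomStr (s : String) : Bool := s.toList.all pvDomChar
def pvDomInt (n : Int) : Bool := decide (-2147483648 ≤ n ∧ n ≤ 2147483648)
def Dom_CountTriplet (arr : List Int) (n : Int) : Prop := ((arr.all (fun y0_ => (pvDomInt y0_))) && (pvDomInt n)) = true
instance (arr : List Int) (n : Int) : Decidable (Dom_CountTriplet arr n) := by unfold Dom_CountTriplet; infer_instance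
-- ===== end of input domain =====

-- B counts by value frequency (Counter over the n-prefix, ordered value pairs whose sum is
-- present, minus self-pairs, halved) instead of A's scan over all index pairs; objective:
-- alternative. Neither version mutates its arguments.

-- ===== PORT A =====
def CountTriplet (arr : List Int) (n : Int) : Int :=
  -- d[a] += 1 over a defaultdict(lambda: 0); the loop is Counter's fold
  let d := arr.foldl (fun d a => d.modify a 0 (· + 1)) (PySem.Dict.empty : PySem.Dict Int Int)
  -- for i in range(n): j = i+1; while j < n: if d[arr[i]+arr[j]]: count += 1
  -- (reading d[k] on a defaultdict inserts k with value 0, which never changes any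
  --  later truth test, so the getD-with-default-0 lookup is exact here)
  (PySem.List.pyRange 0 n 1).foldl (fun count i =>
    (PySem.List.pyRange (i + 1) n 1).foldl (fun count j =>
      if d.getD (PySem.List.pyGetD arr i 0 + PySem.List.pyGetD arr j 0) 0 ≠ 0
      then count + 1 else count) count) 0

-- ===== PORT B =====
def CountTriplet_alt (arr : List Int) (n : Int) : Int :=
  if n < 2 then 0
  else
    let present : PySem.Set Int := PySem.Set.ofList arr
    let pre := PySem.List.slice arr none (some n)
    let cnt := PySem.Dict.counter pre
    let ordered := cnt.items.foldl (fun acc xc =>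
      cnt.items.foldl (fun acc2 yc =>
        if PySem.Set.contains present (xc.1 + yc.1) then acc2 + xc.2 * yc.2 else acc2) acc) 0
    let diag := pre.foldl (fun acc v =>
      if PySem.Set.contains present (2 * v) then acc + 1 else acc) 0
    PySem.Int.floordiv (ordered - diag) 2

-- ===== PRECONDITION & SPEC =====
-- A indexes arr[i] for every i < n, so it raises IndexError exactly when n > len(arr).
def Pre_CountTriplet (arr : List Int) (n : Int) : Prop := n ≤ (arr.length : Int)
instance (arr : List Int) (n : Int) : Decidable (Pre_CountTriplet arr n) := by
  unfold Pre_CountTriplet; infer_instance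
def pvWitness_CountTriplet : List Int × Int := ([1, 2, 3], 3)

def Spec_CountTriplet (arr : List Int) (n : Int) (out : Int) : Prop := out = CountTriplet_alt arr n
instance (arr : List Int) (n : Int) (out : Int) : Decidable (Spec_CountTriplet arr n out) := by unfold Spec_CountTriplet; infer_instance

-- ===== CLAIM (what is proved, stated in full; the proofs are below) =====
def Claim_equal_CountTriplet : Prop := ∀ (arr : List Int) (n : Int), Dom_CountTriplet arr n → Pre_CountTriplet arr n → Spec_CountTriplet arr n (CountTriplet arr n)

-- ===== LEMMAS AND PROOFS =====

-- 0/1 indicator of "a + b occurs in S"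
def pvInd (S : List Int) (a b : Int) : Int := if a + b ∈ S then 1 else 0
-- sum of indicators of a against every element of t
def pvRow (S : List Int) (a : Int) (t : List Int) : Int := (t.map (pvInd S a)).sum
-- sum over unordered index pairs i < j of p
def pvPair (S : List Int) : List Int → Int
  | [] => 0
  | h :: t => pvRow S h t + pvPair S t
-- sum over ALL ordered index pairs of p
def pvAll (S : List Int) (p : List Int) : Int := (p.map (fun a => pvRow S a p)).sum
-- sum over the diagonal pairs
def pvDiag (S : List Int) (p : List Int) : Int := (p.map (fun a => pvInd S a a)).sum

lemma pvInd_comm (S : List Int) (a b : Int) : pvInd S a b = pvInd S b a := by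
  simp [pvInd, Int.add_comm]

lemma pvAll_eq (S : List Int) (p : List Int) :
    pvAll S p = 2 * pvPair S p + pvDiag S p := by
  induction p with
  | nil => simp [pvAll, pvPair, pvDiag]
  | cons h t ih =>
    have hrow : ∀ a : Int, pvRow S a (h :: t) = pvInd S a h + pvRow S a t := by
      intro a; simp [pvRow]
    have hsym : (t.map fun a => pvInd S a h).sum = pvRow S h t := by
      unfold pvRow
      congr 1
      exact List.map_congr_left (fun a _ => pvInd_comm S a h)
    have hall : pvAll S (h :: t) =
        pvInd S h h + pvRow S h t + ((t.map fun a => pvInd S a h).sum + pvAll S t) := by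
      simp only [pvAll, List.map_cons, List.sum_cons, hrow,
        PySem.List.sum_map_add_int]
    rw [hall, hsym, ih]
    simp only [pvPair, pvDiag, List.map_cons, List.sum_cons]
    ring

lemma pvPair_append (S : List Int) (p : List Int) (a : Int) :
    pvPair S (p ++ [a]) = pvPair S p + (p.map fun b => pvInd S b a).sum := by
  induction p with
  | nil => simp [pvPair, pvRow]
  | cons h t ih =>
    simp only [List.cons_append, pvPair, ih, List.map_cons, List.sum_cons]
    have : pvRow S h (t ++ [a]) = pvRow S h t + pvInd S h a := by
      simp [pvRow]
    rw [this]; ring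

lemma pv_sum_ite_eq (u : List Int) (a : Int) (h : Int → Int)
    (hn : u.Nodup) (ha : a ∈ u) :
    (u.map fun x => if x = a then h x else 0).sum = h a := by
  induction u with
  | nil => cases ha
  | cons y t ih =>
    rcases List.mem_cons.mp ha with rfl | hat
    · have : (t.map fun x => if x = a then h x else 0) = t.map fun _ => (0 : Int) := by
        refine List.map_congr_left (fun x hx => ?_)
        have : x ≠ a := fun he => ((List.nodup_cons.mp hn).1 (he ▸ hx))
        simp [this]
      simp [this]
    · have hya : y ≠ a := fun he => ((List.nodup_cons.mp hn).1 (he ▸ hat))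
      simp [hya, ih (List.nodup_cons.mp hn).2 hat]

-- summing h over a list equals summing count·h over any nodup cover of it
lemma pv_sum_count_mul (p u : List Int) (h : Int → Int)
    (hn : u.Nodup) (hsub : ∀ a ∈ p, a ∈ u) :
    (u.map fun x => (p.count x : Int) * h x).sum = (p.map h).sum := by
  induction p with
  | nil => simp
  | cons b t ih =>
    have hb : b ∈ u := hsub b List.mem_cons_self
    have hstep : (u.map fun x => ((b :: t).count x : Int) * h x) =
        u.map fun x => (t.count x : Int) * h x + (if x = b then h x else 0) := by
      refine List.map_congr_left (fun x _ => ?_)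
      rw [List.count_cons]
      push_cast
      by_cases hxb : x = b
      · subst hxb; simp; ring
      · simp [hxb, Ne.symm hxb]
    rw [hstep, PySem.List.sum_map_add_int, ih (fun a ha => hsub a (List.mem_cons_of_mem b ha)),
      pv_sum_ite_eq u b h hn hb]
    simp [add_comm]

lemma pv_contains_eq (arr : List Int) (v : Int) :
    PySem.Set.contains (PySem.Set.ofList arr) v = decide (v ∈ arr) := by
  simp [pysem]

-- the first m positions of arr, read through pyGetD, are arr.take m
lemma pv_map_getD_take (arr : List Int) (m : Nat) (hm : m ≤ arr.length) :
    (PySem.List.pyRange 0 (m : Int) 1).map (fun i => PySem.List.pyGetD arr i 0) = arr.take m := by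
  have hsplit : PySem.List.pyRange 0 (arr.length : Int) 1 =
      PySem.List.pyRange 0 (m : Int) 1 ++ PySem.List.pyRange (m : Int) (arr.length : Int) 1 :=
    PySem.List.pyRange_one_append 0 (m : Int) (arr.length : Int) (by exact Int.natCast_nonneg m) (by exact_mod_cast hm)
  have hfull := PySem.List.map_pyGetD_pyRange_zero' arr 0
  have hdrop := PySem.List.map_pyGetD_pyRange' arr 0 (a := (m : Int)) (by exact Int.natCast_nonneg m)
  rw [hsplit, List.map_append, hdrop] at hfull
  have htd : arr = arr.take m ++ arr.drop ((m : Int)).toNat := by simp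
  have := hfull.trans htd
  exact List.append_cancel_right this

-- the row sums of A's loop, and its total
def pvRowA (arr : List Int) (m : Nat) (i : Int) : Int :=
  ((PySem.List.pyRange (i + 1) (m : Int) 1).map
    (fun j => pvInd arr (PySem.List.pyGetD arr i 0) (PySem.List.pyGetD arr j 0))).sum
def pvTA (arr : List Int) (m : Nat) : Int :=
  ((PySem.List.pyRange 0 (m : Int) 1).map (pvRowA arr m)).sum

lemma pvTA_succ (arr : List Int) (m : Nat) (hm : m < arr.length) :
    pvTA arr (m + 1) = pvTA arr m +
      ((arr.take m).map fun b => pvInd arr b arr[m]).sum := by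
  have hcast : ((m + 1 : Nat) : Int) = (m : Int) + 1 := by push_cast; ring
  have hsplit : PySem.List.pyRange 0 ((m + 1 : Nat) : Int) 1 =
      PySem.List.pyRange 0 (m : Int) 1 ++ [(m : Int)] := by
    rw [hcast]; exact PySem.List.pyRange_one_succ_right (by positivity)
  have hlast : pvRowA arr (m + 1) (m : Int) = 0 := by
    unfold pvRowA
    rw [hcast, PySem.List.pyRange_one_eq_nil (by omega)]
    simp
  have hgm : PySem.List.pyGetD arr ((m : Int)) 0 = arr[m] := by
    rw [PySem.List.pyGetD_natCast]
    exact List.getD_eq_getElem arr 0 hm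
  have hrow : ∀ i ∈ PySem.List.pyRange 0 (m : Int) 1,
      pvRowA arr (m + 1) i = pvRowA arr m i +
        pvInd arr (PySem.List.pyGetD arr i 0) arr[m] := by
    intro i hi
    have hib := (PySem.List.mem_pyRange_one.mp hi)
    unfold pvRowA
    have : PySem.List.pyRange (i + 1) ((m + 1 : Nat) : Int) 1 =
        PySem.List.pyRange (i + 1) (m : Int) 1 ++ [(m : Int)] := by
      rw [hcast]; exact PySem.List.pyRange_one_succ_right (by omega)
    rw [this]
    simp [hgm]
  unfold pvTA
  rw [hsplit, List.map_append, List.sum_append,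
    List.map_congr_left hrow, PySem.List.sum_map_add_int]
  have hmapmap : (PySem.List.pyRange 0 (m : Int) 1).map
      (fun i => pvInd arr (PySem.List.pyGetD arr i 0) arr[m]) =
      ((PySem.List.pyRange 0 (m : Int) 1).map (fun i => PySem.List.pyGetD arr i 0)).map
        (fun b => pvInd arr b arr[m]) := by
    rw [List.map_map]; rfl
  rw [hmapmap, pv_map_getD_take arr m (le_of_lt hm)]
  simp [hlast]

lemma pvTA_eq_pvPair (arr : List Int) (m : Nat) (hm : m ≤ arr.length) :
    pvTA arr m = pvPair arr (arr.take m) := by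
  induction m with
  | zero => simp [pvTA, pvPair]
  | succ k ih =>
    have hk : k < arr.length := by omega
    have htake : arr.take (k + 1) = arr.take k ++ [arr[k]] := by
      rw [List.take_add_one]
      congr
      simp [List.getElem?_eq_getElem hk]
    rw [pvTA_succ arr k hk, ih (le_of_lt hk), htake, pvPair_append]

-- A's nested loops compute pvTA
lemma pvA_eq_pvTA (arr : List Int) (m : Nat) :
    CountTriplet arr (m : Int) = pvTA arr m := by
  simp only [CountTriplet]
  have hd : arr.foldl (fun d a => d.modify a 0 (· + 1)) (PySem.Dict.empty : PySem.Dict Int Int)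
      = PySem.Dict.counter arr := (PySem.Dict.counter_eq_foldl arr).symm
  rw [hd]
  have hstep : (fun (count : Int) (i : Int) =>
      (PySem.List.pyRange (i + 1) (m : Int) 1).foldl (fun count j =>
        if (PySem.Dict.counter arr).getD (PySem.List.pyGetD arr i 0 + PySem.List.pyGetD arr j 0) 0 ≠ 0
        then count + 1 else count) count) =
      fun (count : Int) (i : Int) => count + pvRowA arr m i := by
    funext count i
    have hstep2 : (fun (c : Int) (j : Int) =>
        if (PySem.Dict.counter arr).getD (PySem.List.pyGetD arr i 0 + PySem.List.pyGetD arr j 0) 0 ≠ 0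
        then c + 1 else c) =
        fun (c : Int) (j : Int) =>
          c + pvInd arr (PySem.List.pyGetD arr i 0) (PySem.List.pyGetD arr j 0) := by
      funext c j
      rw [PySem.Dict.getD_counter]
      have : ((arr.count (PySem.List.pyGetD arr i 0 + PySem.List.pyGetD arr j 0) : Int) ≠ 0)
          ↔ (PySem.List.pyGetD arr i 0 + PySem.List.pyGetD arr j 0) ∈ arr := by
        rw [← List.count_pos_iff]
        omega
      unfold pvInd
      split_ifs with h1 h2 h2
      · rfl
      · exact absurd (this.mp h1) h2
      · exact absurd (this.mpr h2) h1
      · simp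
    rw [hstep2, PySem.List.foldl_add]
    rfl
  rw [hstep, PySem.List.foldl_add]
  simp [pvTA]

-- B's ordered double loop over the counter items is pvAll of the prefix
lemma pvB_ordered (arr pre : List Int) :
    ((PySem.Dict.counter pre).items.foldl (fun acc xc =>
      (PySem.Dict.counter pre).items.foldl (fun acc2 yc =>
        if PySem.Set.contains (PySem.Set.ofList arr) (xc.1 + yc.1)
        then acc2 + xc.2 * yc.2 else acc2) acc) 0) = pvAll arr pre := by
  have hinner : ∀ (xc : Int × Int) (acc : Int),
      ((PySem.Dict.counter pre).items.foldl (fun acc2 yc =>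
        if PySem.Set.contains (PySem.Set.ofList arr) (xc.1 + yc.1)
        then acc2 + xc.2 * yc.2 else acc2) acc) =
      acc + ((PySem.Dict.counter pre).items.map
        (fun yc => xc.2 * (yc.2 * pvInd arr xc.1 yc.1))).sum := by
    intro xc acc
    have : (fun (acc2 : Int) (yc : Int × Int) =>
        if PySem.Set.contains (PySem.Set.ofList arr) (xc.1 + yc.1)
        then acc2 + xc.2 * yc.2 else acc2) =
        fun acc2 yc => acc2 + xc.2 * (yc.2 * pvInd arr xc.1 yc.1) := by
      funext acc2 yc
      rw [pv_contains_eq]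
      unfold pvInd
      by_cases h : (xc.1 + yc.1) ∈ arr <;> simp [h]
    rw [this, PySem.List.foldl_add]
  have houter : (fun (acc : Int) (xc : Int × Int) =>
      (PySem.Dict.counter pre).items.foldl (fun acc2 yc =>
        if PySem.Set.contains (PySem.Set.ofList arr) (xc.1 + yc.1)
        then acc2 + xc.2 * yc.2 else acc2) acc) =
      fun acc xc => acc + ((PySem.Dict.counter pre).items.map
        (fun yc => xc.2 * (yc.2 * pvInd arr xc.1 yc.1))).sum := by
    funext acc xc; exact hinner xc acc
  rw [houter, PySem.List.foldl_add, zero_add, PySem.Dict.items_counter]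
  have hu := PySem.Set.nodup_ofList pre
  have hsub : ∀ a ∈ pre, a ∈ PySem.Set.ofList pre :=
    fun a ha => (PySem.Set.mem_ofList pre a).mpr ha
  simp only [List.map_map, Function.comp_def]
  have hrow : ∀ x : Int,
      ((PySem.Set.ofList pre).map
        (fun k => (pre.count x : Int) * ((pre.count k : Int) * pvInd arr x k))).sum =
      (pre.count x : Int) * pvRow arr x pre := by
    intro x
    rw [PySem.List.sum_map_const_mul_int (PySem.Set.ofList pre) (pre.count x : Int)
      (fun k => (pre.count k : Int) * pvInd arr x k)]
    congr 1
    exact pv_sum_count_mul pre (PySem.Set.ofList pre) (pvInd arr x) hu hsub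
  rw [List.map_congr_left (fun x _ => hrow x)]
  exact pv_sum_count_mul pre (PySem.Set.ofList pre) (fun a => pvRow arr a pre) hu hsub

lemma pvB_diag (arr pre : List Int) :
    (pre.foldl (fun acc v =>
      if PySem.Set.contains (PySem.Set.ofList arr) (2 * v) then acc + 1 else acc) 0) =
    pvDiag arr pre := by
  have : (fun (acc : Int) (v : Int) =>
      if PySem.Set.contains (PySem.Set.ofList arr) (2 * v) then acc + 1 else acc) =
      fun acc v => acc + pvInd arr v v := by
    funext acc v
    rw [pv_contains_eq]
    unfold pvInd
    by_cases h : v + v ∈ arr <;> simp [two_mul, h]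
  rw [this, PySem.List.foldl_add]
  simp [pvDiag]

lemma pvPair_short (S : List Int) (p : List Int) (hp : p.length ≤ 1) : pvPair S p = 0 := by
  match p, hp with
  | [], _ => rfl
  | [a], _ => simp [pvPair, pvRow]

-- ===== VERDICT (by name: the statement is the Claim_ definition above) =====
theorem CountTriplet_spec : Claim_equal_CountTriplet := by
  intro arr n _ hpre
  unfold Spec_CountTriplet
  unfold Pre_CountTriplet at hpre
  by_cases hneg : n < 0
  · simp only [CountTriplet, CountTriplet_alt,
      PySem.List.pyRange_one_eq_nil (show n ≤ 0 by omega), List.foldl_nil,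
      if_pos (show n < 2 by omega)]
  · rw [not_lt] at hneg
    obtain ⟨m, rfl⟩ := Int.eq_ofNat_of_zero_le hneg
    have hm : m ≤ arr.length := by exact_mod_cast hpre
    have hA : CountTriplet arr (m : Int) = pvPair arr (arr.take m) :=
      (pvA_eq_pvTA arr m).trans (pvTA_eq_pvPair arr m hm)
    by_cases hsmall : (m : Int) < 2
    · rw [hA]
      unfold CountTriplet_alt
      rw [if_pos hsmall]
      exact pvPair_short arr (arr.take m) (by simp; omega)
    · rw [hA]
      unfold CountTriplet_alt
      rw [if_neg hsmall]
      simp only [PySem.List.slice_to arr (b := (m : Int)) (by positivity), Int.toNat_natCast]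
      rw [pvB_ordered arr (arr.take m), pvB_diag arr (arr.take m)]
      rw [pvAll_eq]
      have h2 : 2 * pvPair arr (arr.take m) + pvDiag arr (arr.take m) - pvDiag arr (arr.take m)
          = 2 * pvPair arr (arr.take m) := by ring
      rw [h2, PySem.Int.floordiv_eq_ediv_of_pos (by omega)]
      omega
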